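-- pv_equiv track=rewrite | github.com/fabianivulic/complex-systems-13 | growthdeath.py | check_blood
-- ===== SOURCE A (Python) =====
-- def check_blood(x, y, occupied, radius):
--     """Check the number of blood vessels surrounding a tumor cell.
--     Input:
--     - x, y: The coordinates of the tumor cell
--     - occupied: The set of occupied sites
--     - radius: The radius of the neighborhood to check
--     Output:
--     - A list of coordinates of blood vessels surrounding the tumor cell
--     """
--     blood = []
--
--     for dx in range(-radius, radius + 1):
--         for dy in range(-radius, radius + 1):
--             if abs(dx) + abs(dy) <= radius and (x, y) in occupied:
--                 nx, ny = x + dx, y + dy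
--                 blood.append((nx, ny))
--
--     return blood
-- ===== SOURCE B (Python) =====
-- def check_blood(x, y, occupied, radius):
--     """Diamond neighborhood of (x, y) if the center is occupied, else [].
--
--     Builds only the top half of the diamond (rows dx = -radius .. 0), then
--     obtains the bottom half by mirroring those rows across the center row,
--     instead of scanning the full (2r+1)^2 square and filtering each cell.
--     """
--     if (x, y) not in occupied:
--         return []
--     top = []
--     for dx in range(-radius, 1):
--         span = radius + dx
--         top.append([(x + dx, y + dy) for dy in range(-span, span + 1)])
--     blood = [p for row in top for p in row]
--     for row in reversed(top[:-1]):
--         blood.extend((2 * x - px, py) for (px, py) in row)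
--     return blood
-- ===== Notes on version B (the rewrite author's own statement) =====
-- stated objective: alternative
-- what changed: B early-returns [] when the center is unoccupied (A's membership test is loop-invariant), builds only the top half of the diamond row by row with exact row bounds, and produces the bottom half by mirroring the already-built top rows across the center row, instead of A's full-square double scan with a per-cell Manhattan-distance filter.
import Mathlib
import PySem

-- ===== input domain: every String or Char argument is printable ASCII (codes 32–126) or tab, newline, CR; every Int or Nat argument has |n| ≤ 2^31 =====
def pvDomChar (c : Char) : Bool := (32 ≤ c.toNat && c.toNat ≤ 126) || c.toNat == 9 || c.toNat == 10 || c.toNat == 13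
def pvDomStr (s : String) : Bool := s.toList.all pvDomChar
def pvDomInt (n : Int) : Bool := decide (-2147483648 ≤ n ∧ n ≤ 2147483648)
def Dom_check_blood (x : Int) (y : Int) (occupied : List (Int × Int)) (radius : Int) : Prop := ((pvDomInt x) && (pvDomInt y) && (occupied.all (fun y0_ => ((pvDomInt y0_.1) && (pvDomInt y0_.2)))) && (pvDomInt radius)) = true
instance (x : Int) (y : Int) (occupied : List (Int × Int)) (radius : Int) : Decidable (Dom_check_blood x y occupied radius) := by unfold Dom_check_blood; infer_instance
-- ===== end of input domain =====

-- B early-returns when the center is unoccupied, builds only the top half of the diamond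
-- row by row, and obtains the bottom half by mirroring the built rows across the center
-- row, instead of A's full-square scan with a per-cell filter (objective: alternative).

-- ===== PORT A =====
def check_blood (x : Int) (y : Int) (occupied : List (Int × Int)) (radius : Int) : List (Int × Int) :=
  (PySem.List.pyRange (-radius) (radius + 1) 1).foldl (fun blood dx =>
    (PySem.List.pyRange (-radius) (radius + 1) 1).foldl (fun blood2 dy =>
      if |dx| + |dy| ≤ radius ∧ (x, y) ∈ occupied then blood2 ++ [(x + dx, y + dy)]
      else blood2) blood) []

-- ===== PORT B =====
def check_blood_alt (x : Int) (y : Int) (occupied : List (Int × Int)) (radius : Int) : List (Int × Int) :=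
  if (x, y) ∈ occupied then
    let top : List (List (Int × Int)) :=
      (PySem.List.pyRange (-radius) 1 1).foldl (fun top dx =>
        top ++ [(PySem.List.pyRange (-(radius + dx)) (radius + dx + 1) 1).map
          (fun dy => (x + dx, y + dy))]) []
    let blood := top.flatten
    top.dropLast.reverse.foldl (fun blood row =>
      blood ++ row.map (fun p => (2 * x - p.1, p.2))) blood
  else []

-- ===== PRECONDITION & SPEC =====
def Spec_check_blood (x : Int) (y : Int) (occupied : List (Int × Int)) (radius : Int) (out : List (Int × Int)) : Prop := out = check_blood_alt x y occupied radius
instance (x : Int) (y : Int) (occupied : List (Int × Int)) (radius : Int) (out : List (Int × Int)) : Decidable (Spec_check_blood x y occupied radius out) := by unfold Spec_check_blood; infer_instance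

-- ===== CLAIM (what is proved, stated in full; the proofs are below) =====
def Claim_equal_check_blood : Prop := ∀ (x : Int) (y : Int) (occupied : List (Int × Int)) (radius : Int), Dom_check_blood x y occupied radius → Spec_check_blood x y occupied radius (check_blood x y occupied radius)

-- ===== LEMMAS AND PROOFS =====

-- The diamond row for offset dx: the points (x+dx, y+dy) with |dy| ≤ radius - |dx|.
def rowD (x y radius dx : Int) : List (Int × Int) :=
  (PySem.List.pyRange (-(radius - |dx|)) (radius - |dx| + 1) 1).map (fun dy => (x + dx, y + dy))

-- Filtering the full square range by |dy| ≤ s trims it to the diamond-row range [-s, s].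
theorem filter_abs_pyRange (n : Nat) : ∀ (r s : Int), (r - s).toNat = n → 0 ≤ s → s ≤ r →
    (PySem.List.pyRange (-r) (r + 1) 1).filter (fun dy => decide (|dy| ≤ s))
      = PySem.List.pyRange (-s) (s + 1) 1 := by
  induction n with
  | zero =>
    intro r s hn h0 hs
    have : r = s := by omega
    subst this
    apply List.filter_eq_self.mpr
    intro a ha
    rw [PySem.List.mem_pyRange_one] at ha
    simp only [decide_eq_true_eq]
    rw [abs_le]; omega
  | succ k ih =>
    intro r s hn h0 hs
    rw [PySem.List.pyRange_one_cons (by omega : -r < r + 1),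
        PySem.List.pyRange_one_succ_right (by omega : -r + 1 ≤ r)]
    rw [List.filter_cons, List.filter_append]
    have hr : |r| = r := abs_of_nonneg (by omega)
    have h1 : (decide (|(-r)| ≤ s)) = false := by
      simp only [abs_neg, hr, decide_eq_false_iff_not, not_le]; omega
    have h2 : ([r].filter (fun dy => decide (|dy| ≤ s))) = [] := by
      have hf : decide (|r| ≤ s) = false := by
        simp only [hr, decide_eq_false_iff_not, not_le]; omega
      simp [hf]
    rw [h1, h2, List.append_nil]
    have := ih (r - 1) s (by omega) h0 (by omega)
    simpa [show -(r - 1) = -r + 1 by ring, show (r - 1) + 1 = r by ring] using this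

-- A's inner loop, when the center is occupied, appends exactly the diamond row for dx.
theorem inner_eq (x y : Int) (occupied : List (Int × Int)) (radius : Int)
    (hmem : (x, y) ∈ occupied) (blood : List (Int × Int)) (dx : Int)
    (hdx : dx ∈ PySem.List.pyRange (-radius) (radius + 1) 1) :
    (PySem.List.pyRange (-radius) (radius + 1) 1).foldl (fun blood2 dy =>
        if |dx| + |dy| ≤ radius ∧ (x, y) ∈ occupied then blood2 ++ [(x + dx, y + dy)]
        else blood2) blood
      = blood ++ rowD x y radius dx := by
  rw [PySem.List.mem_pyRange_one] at hdx
  have hax : |dx| ≤ radius := abs_le.mpr ⟨hdx.1, by omega⟩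
  have h0x : (0 : Int) ≤ |dx| := abs_nonneg dx
  rw [PySem.List.foldl_congr_mem _ _
        (fun blood2 dy => if decide (|dy| ≤ radius - |dx|) then blood2 ++ [(x + dx, y + dy)]
          else blood2) blood
        (by
          intro acc dy _
          have hiff : (|dx| + |dy| ≤ radius ∧ (x, y) ∈ occupied) ↔ (|dy| ≤ radius - |dx|) := by
            constructor
            · rintro ⟨h, _⟩; omega
            · intro h; exact ⟨by omega, hmem⟩
          simp only [hiff, decide_eq_true_eq]),
      PySem.List.foldl_append_if,
      filter_abs_pyRange (radius - (radius - |dx|)).toNat radius (radius - |dx|) rfl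
        (by omega) (by omega)]
  rfl

-- A, when the center is occupied, is the concatenation of all diamond rows.
theorem a_eq_flatMap (x y : Int) (occupied : List (Int × Int)) (radius : Int)
    (hmem : (x, y) ∈ occupied) :
    check_blood x y occupied radius
      = (PySem.List.pyRange (-radius) (radius + 1) 1).flatMap (rowD x y radius) := by
  unfold check_blood
  rw [PySem.List.foldl_congr_mem _ _ (fun blood dx => blood ++ rowD x y radius dx) []
        (fun blood dx hdx => inner_eq x y occupied radius hmem blood dx hdx),
      PySem.List.foldl_append_eq_flatMap]
  rfl

-- A's inner loop adds nothing when the center is not occupied.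
theorem inner_nil (x y : Int) (occupied : List (Int × Int)) (radius : Int)
    (hmem : (x, y) ∉ occupied) (blood : List (Int × Int)) (dx : Int) :
    (PySem.List.pyRange (-radius) (radius + 1) 1).foldl (fun blood2 dy =>
        if |dx| + |dy| ≤ radius ∧ (x, y) ∈ occupied then blood2 ++ [(x + dx, y + dy)]
        else blood2) blood = blood := by
  rw [PySem.List.foldl_congr_mem _ _ (fun acc (_ : Int) => acc) blood
        (by intro acc dy _; rw [if_neg (by tauto)])]
  exact List.foldl_fixed _

-- Mirroring a diamond row across the center row yields the opposite row.
theorem mirror_rowD (x y radius dx : Int) :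
    (rowD x y radius dx).map (fun p => (2 * x - p.1, p.2)) = rowD x y radius (-dx) := by
  unfold rowD
  rw [abs_neg, List.map_map]
  apply List.map_congr_left
  intro dy _
  simp only [Function.comp]
  have : 2 * x - (x + dx) = x + -dx := by ring
  rw [this]

-- Reversing and negating the negative half-range gives the positive half-range.
theorem reverse_neg_range (r : Int) (hr : 0 ≤ r) :
    ((PySem.List.pyRange (-r) 0 1).reverse.map Neg.neg) = PySem.List.pyRange 1 (r + 1) 1 := by
  apply List.ext_getElem
  · simp [PySem.List.length_pyRange_one]
  · intro i h1 h2
    simp only [List.getElem_map, List.getElem_reverse]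
    have hlen : (PySem.List.pyRange (-r) 0 1).length = r.toNat := by
      simp [PySem.List.length_pyRange_one]
    rw [PySem.List.getElem_pyRange_one, PySem.List.getElem_pyRange_one]
    have hi : i < r.toNat := by
      rw [List.length_map, List.length_reverse, hlen] at h1
      exact h1
    have : ((PySem.List.pyRange (-r) 0 1).length - 1 - i : Nat) = r.toNat - 1 - i := by omega
    rw [this]
    omega

-- ===== VERDICT (by name: the statement is the Claim_ definition above) =====
theorem check_blood_spec : Claim_equal_check_blood := by
  intro x y occupied radius _
  unfold Spec_check_blood check_blood_alt
  by_cases hmem : (x, y) ∈ occupied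
  · rw [if_pos hmem]
    simp only []
    -- B's top list is the list of diamond rows for dx = -radius .. 0
    have htop : (PySem.List.pyRange (-radius) 1 1).foldl (fun top dx =>
          top ++ [(PySem.List.pyRange (-(radius + dx)) (radius + dx + 1) 1).map
            (fun dy => (x + dx, y + dy))]) ([] : List (List (Int × Int)))
        = (PySem.List.pyRange (-radius) 1 1).map (rowD x y radius) := by
      rw [PySem.List.foldl_append_singleton_eq_map]
      simp only [List.nil_append]
      apply List.map_congr_left
      intro dx hdx
      rw [PySem.List.mem_pyRange_one] at hdx
      have : |dx| = -dx := abs_of_nonpos (by omega)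
      unfold rowD
      rw [this]
      ring_nf
    rw [htop]
    by_cases hr : 0 ≤ radius
    · -- split the half range at its last element 0
      have hsplit : PySem.List.pyRange (-radius) 1 1
          = PySem.List.pyRange (-radius) 0 1 ++ [0] := by
        have := PySem.List.pyRange_one_succ_right (a := -radius) (b := 0) (by omega)
        simpa using this
      rw [hsplit, List.map_append, List.map_singleton, List.dropLast_concat,
          ← List.map_reverse, PySem.List.foldl_append_eq_flatMap]
      rw [a_eq_flatMap x y occupied radius hmem]
      have hflat : ∀ (L : List (List (Int × Int))),
          L.flatten = L.flatMap id := by intro L; simp [List.flatMap_id]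
      rw [List.flatten_append]
      simp only [List.flatten_cons, List.flatten_nil, List.append_nil]
      rw [List.flatMap_map]
      -- tail: flatMap of mirrored rows over the reversed negative half
      have htail : (PySem.List.pyRange (-radius) 0 1).reverse.flatMap
            (fun a => (rowD x y radius a).map (fun p => (2 * x - p.1, p.2)))
          = (PySem.List.pyRange 1 (radius + 1) 1).flatMap (rowD x y radius) := by
        have he : (fun a => (rowD x y radius a).map (fun p => (2 * x - p.1, p.2)))
            = rowD x y radius ∘ Neg.neg := by
          funext dx
          exact mirror_rowD x y radius dx
        rw [he]
        have hm := List.flatMap_map Neg.neg (rowD x y radius)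
          (PySem.List.pyRange (-radius) 0 1).reverse
        rw [show (rowD x y radius ∘ Neg.neg) = fun a => rowD x y radius (-a) from rfl,
            ← hm, reverse_neg_range radius hr]
      rw [htail]
      rw [PySem.List.pyRange_one_append (-radius) 1 (radius + 1) (by omega) (by omega),
          List.flatMap_append]
      have h0 : PySem.List.pyRange (-radius) 1 1
          = PySem.List.pyRange (-radius) 0 1 ++ [0] := hsplit
      rw [h0, List.flatMap_append]
      simp [List.flatMap_cons]
      simp [List.flatMap]
    · -- radius < 0: every range is empty, both sides are []
      have h1 : PySem.List.pyRange (-radius) 1 1 = [] :=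
        PySem.List.pyRange_one_eq_nil (by omega)
      have h2 : PySem.List.pyRange (-radius) (radius + 1) 1 = [] :=
        PySem.List.pyRange_one_eq_nil (by omega)
      rw [a_eq_flatMap x y occupied radius hmem, h1, h2]
      simp
  · rw [if_neg hmem]
    unfold check_blood
    rw [PySem.List.foldl_congr_mem _ _ (fun acc (_ : Int) => acc) []
          (fun blood dx _ => inner_nil x y occupied radius hmem blood dx)]
    exact List.foldl_fixed _
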